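-- pv_equiv track=rewrite | github.com/Hashem-Al-Qurashi/Sales-Ai-system- | production/api/hormozi_rag/core/cohesion_detector.py | _find_framework_end
-- ===== SOURCE A (Python) =====
-- from typing import List, Dict, Optional, Tuple, Any, Set
--
-- def _find_framework_end(text: str, start_pos: int, end_markers: List[str]) -> int:
--     """Find the end position of a framework."""
--     search_text = text[start_pos:start_pos + 5000]  # Search within 5000 chars
--
--     end_pos = start_pos + len(search_text)
--     for marker in end_markers:
--         pos = search_text.find(marker)
--         if pos != -1:
--             end_pos = min(end_pos, start_pos + pos)
--
--     return end_pos
-- ===== SOURCE B (Python) =====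
-- def _find_framework_end(text, start_pos, end_markers):
--     """Find the end position of a framework (left-to-right position scan)."""
--     search_text = text[start_pos:start_pos + 5000]
--     for i in range(len(search_text)):
--         if any(search_text.startswith(m, i) for m in end_markers):
--             return start_pos + i
--     return start_pos + len(search_text)
-- ===== Notes on version B (the rewrite author's own statement) =====
-- stated objective: alternative
-- what changed: Replaces per-marker find()+min aggregation with a single left-to-right scan of the window that returns at the first position where any marker starts.
import Mathlib
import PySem

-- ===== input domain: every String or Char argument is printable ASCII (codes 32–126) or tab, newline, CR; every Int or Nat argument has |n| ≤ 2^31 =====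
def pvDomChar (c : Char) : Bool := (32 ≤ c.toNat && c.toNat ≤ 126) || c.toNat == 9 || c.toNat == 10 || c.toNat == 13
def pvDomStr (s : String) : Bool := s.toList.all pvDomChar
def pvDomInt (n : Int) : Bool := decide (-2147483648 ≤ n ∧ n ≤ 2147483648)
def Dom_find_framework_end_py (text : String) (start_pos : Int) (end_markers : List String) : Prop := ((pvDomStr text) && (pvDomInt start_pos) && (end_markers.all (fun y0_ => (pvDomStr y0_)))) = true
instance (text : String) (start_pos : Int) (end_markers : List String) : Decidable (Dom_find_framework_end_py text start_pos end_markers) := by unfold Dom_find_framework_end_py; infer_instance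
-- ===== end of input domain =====

-- B replaces per-marker find()+min with a single left-to-right scan returning the first
-- position where any marker starts (objective: alternative decomposition, same cost class).

-- ===== PORT A =====
-- search_text = text[start_pos:start_pos+5000]; end_pos = start_pos+len(search_text);
-- for marker in end_markers: pos = search_text.find(marker); if pos != -1: end_pos = min(end_pos, start_pos+pos)
def find_framework_end_py (text : String) (start_pos : Int) (end_markers : List String) : Int :=
  let search_text : List Char :=
    PySem.List.slice text.toList (some start_pos) (some (start_pos + 5000))
  let end_pos0 : Int := start_pos + (search_text.length : Int)
  end_markers.foldl (fun end_pos marker =>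
      let pos := PySem.Chars.find search_text marker.toList
      if pos ≠ -1 then min end_pos (start_pos + pos) else end_pos)
    end_pos0

-- ===== PORT B =====
-- for i in range(len(search_text)): if any(search_text.startswith(m, i) for m in end_markers): return start_pos+i
-- ported as structural recursion over the suffix search_text[i:], carrying i
def pvScanB (markers : List (List Char)) : List Char → Nat → Nat
  | [], i => i
  | c :: rest, i =>
      if markers.any (fun m => PySem.Chars.startswith (c :: rest) m) then i
      else pvScanB markers rest (i + 1)

def find_framework_end_py_alt (text : String) (start_pos : Int) (end_markers : List String) : Int :=
  let search_text : List Char :=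
    PySem.List.slice text.toList (some start_pos) (some (start_pos + 5000))
  start_pos + ((pvScanB (end_markers.map String.toList) search_text 0 : Nat) : Int)

-- ===== PRECONDITION & SPEC =====
def Spec_find_framework_end_py (text : String) (start_pos : Int) (end_markers : List String) (out : Int) : Prop := out = find_framework_end_py_alt text start_pos end_markers
instance (text : String) (start_pos : Int) (end_markers : List String) (out : Int) : Decidable (Spec_find_framework_end_py text start_pos end_markers out) := by unfold Spec_find_framework_end_py; infer_instance

-- ===== CLAIM (what is proved, stated in full; the proofs are below) =====
def Claim_equal_find_framework_end_py : Prop := ∀ (text : String) (start_pos : Int) (end_markers : List String), Dom_find_framework_end_py text start_pos end_markers → Spec_find_framework_end_py text start_pos end_markers (find_framework_end_py text start_pos end_markers)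

-- ===== LEMMAS AND PROOFS =====

-- B's scan: result r satisfies i ≤ r ≤ i + |t|, no marker starts before r, a marker starts at r if r < i + |t|
theorem pvScanB_spec (M : List (List Char)) (t : List Char) (i : Nat) :
    i ≤ pvScanB M t i ∧ pvScanB M t i ≤ i + t.length ∧
    (∀ j, j < pvScanB M t i - i → ¬ ∃ m ∈ M, m <+: t.drop j) ∧
    (pvScanB M t i < i + t.length → ∃ m ∈ M, m <+: t.drop (pvScanB M t i - i)) := by
  induction t generalizing i with
  | nil => simp [pvScanB]
  | cons c rest ih =>
    by_cases h : M.any (fun m => PySem.Chars.startswith (c :: rest) m) = true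
    · simp only [pvScanB, if_pos h]
      refine ⟨le_refl _, by simp, by omega, fun _ => ?_⟩
      simp only [Nat.sub_self, List.drop_zero]
      rcases List.any_eq_true.mp h with ⟨m, hm, hsw⟩
      exact ⟨m, hm, (PySem.Chars.startswith_iff _ _).mp hsw⟩
    · simp only [pvScanB, if_neg h]
      obtain ⟨h1, h2, h3, h4⟩ := ih (i + 1)
      refine ⟨by omega, by simp only [List.length_cons]; omega, ?_, ?_⟩
      · intro j hj hQ
        rcases hQ with ⟨m, hm, hpre⟩
        match j, hj with
        | 0, _ =>
          apply h
          simp only [List.drop_zero] at hpre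
          exact List.any_eq_true.mpr ⟨m, hm, (PySem.Chars.startswith_iff _ _).mpr hpre⟩
        | j + 1, hj =>
          exact h3 j (by omega) ⟨m, hm, by simpa using hpre⟩
      · intro hlt
        rcases h4 (by simp only [List.length_cons] at hlt; omega) with ⟨m, hm, hpre⟩
        refine ⟨m, hm, ?_⟩
        have hr : pvScanB M rest (i + 1) - i = (pvScanB M rest (i + 1) - (i + 1)) + 1 := by omega
        rw [hr]
        simpa using hpre

-- factor start_pos out of A's fold
theorem fold_shift (s : List Char) (sp : Int) (L : List (List Char)) (x : Int) :
    L.foldl (fun end_pos m =>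
        if PySem.Chars.find s m ≠ -1 then min end_pos (sp + PySem.Chars.find s m) else end_pos) (sp + x)
      = sp + L.foldl (fun e m =>
        if PySem.Chars.find s m ≠ -1 then min e (PySem.Chars.find s m) else e) x := by
  induction L generalizing x with
  | nil => rfl
  | cons m L ih =>
    simp only [List.foldl_cons]
    by_cases h : PySem.Chars.find s m ≠ -1
    · rw [if_pos h, if_pos h, min_add_add_left, ih]
    · rw [if_neg h, if_neg h, ih]

-- A's inner fold: result is ≤ init, either init or a find value, and ≤ every successful find
theorem fold_char (s : List Char) (L : List (List Char)) (x : Int) :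
    (L.foldl (fun e m =>
        if PySem.Chars.find s m ≠ -1 then min e (PySem.Chars.find s m) else e) x) ≤ x ∧
    ((L.foldl (fun e m =>
        if PySem.Chars.find s m ≠ -1 then min e (PySem.Chars.find s m) else e) x) = x ∨
      ∃ m ∈ L, PySem.Chars.find s m = (L.foldl (fun e m =>
        if PySem.Chars.find s m ≠ -1 then min e (PySem.Chars.find s m) else e) x) ∧ PySem.Chars.find s m ≠ -1) ∧
    (∀ m ∈ L, PySem.Chars.find s m ≠ -1 →
      (L.foldl (fun e m =>
        if PySem.Chars.find s m ≠ -1 then min e (PySem.Chars.find s m) else e) x) ≤ PySem.Chars.find s m) := by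
  induction L generalizing x with
  | nil => simp
  | cons m L ih =>
    simp only [List.foldl_cons]
    by_cases h : PySem.Chars.find s m ≠ -1
    · simp only [if_pos h]
      obtain ⟨h1, h2, h3⟩ := ih (min x (PySem.Chars.find s m))
      refine ⟨le_trans h1 (min_le_left _ _), ?_, ?_⟩
      · rcases h2 with h2 | ⟨m', hm', he, hne⟩
        · rcases le_total x (PySem.Chars.find s m) with hle | hle
          · left; rw [h2, min_eq_left hle]
          · right; exact ⟨m, List.mem_cons_self .., by rw [h2, min_eq_right hle], h⟩
        · right; exact ⟨m', List.mem_cons_of_mem _ hm', he, hne⟩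
      · intro m' hm' hne'
        rcases List.mem_cons.mp hm' with rfl | hm'
        · exact le_trans h1 (min_le_right _ _)
        · exact h3 m' hm' hne'
    · simp only [if_neg h]
      obtain ⟨h1, h2, h3⟩ := ih x
      refine ⟨h1, ?_, ?_⟩
      · rcases h2 with h2 | ⟨m', hm', he, hne⟩
        · left; exact h2
        · right; exact ⟨m', List.mem_cons_of_mem _ hm', he, hne⟩
      · intro m' hm' hne'
        rcases List.mem_cons.mp hm' with rfl | hm'
        · exact absurd hne' h
        · exact h3 m' hm' hne'

-- a prefix of a suffix of s is an infix of s
theorem prefix_drop_infix {m s : List Char} {j : Nat} (h : m <+: s.drop j) : m <:+: s :=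
  h.isInfix.trans (s.drop_suffix j).isInfix

-- the core equation, on the already-sliced window
theorem pv_main_core (sp : Int) (s : List Char) (markers : List String) :
    markers.foldl (fun end_pos marker =>
        if PySem.Chars.find s marker.toList ≠ -1 then min end_pos (sp + PySem.Chars.find s marker.toList) else end_pos)
      (sp + (s.length : Int))
    = sp + ((pvScanB (markers.map String.toList) s 0 : Nat) : Int) := by
  rw [show markers.foldl (fun end_pos marker =>
        if PySem.Chars.find s marker.toList ≠ -1 then min end_pos (sp + PySem.Chars.find s marker.toList) else end_pos)
      (sp + (s.length : Int)) = (markers.map String.toList).foldl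
      (fun (end_pos : Int) (m : List Char) =>
        if PySem.Chars.find s m ≠ -1 then min end_pos (sp + PySem.Chars.find s m) else end_pos)
      (sp + (s.length : Int)) from
        (List.foldl_map (f := String.toList)
          (g := fun (end_pos : Int) (m : List Char) =>
            if PySem.Chars.find s m ≠ -1 then min end_pos (sp + PySem.Chars.find s m) else end_pos)
          (l := markers) (init := sp + (s.length : Int))).symm]
  set M : List (List Char) := markers.map String.toList with hM
  rw [fold_shift]
  set n : Nat := s.length with hn
  set e : Int := M.foldl (fun e m =>
      if PySem.Chars.find s m ≠ -1 then min e (PySem.Chars.find s m) else e) (n : Int) with he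
  set r : Nat := pvScanB M s 0 with hr
  congr 1
  obtain ⟨-, hr2, hr3, hr4⟩ := pvScanB_spec M s 0
  obtain ⟨he1, he2, he3⟩ := fold_char s M (n : Int)
  rw [← he] at he1 he2 he3
  rw [← hr] at hr2 hr3 hr4
  have hen : 0 ≤ e := by
    rcases he2 with h2 | ⟨m, _, hfe, hne⟩
    · rw [h2]; positivity
    · rw [← hfe]
      have := PySem.Chars.neg_one_le_find s m
      omega
  have heNo : ∀ j, j < e.toNat → ¬ ∃ m ∈ M, m <+: s.drop j := by
    rintro j hj ⟨m, hm, hpre⟩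
    have hfind : PySem.Chars.find s m ≠ -1 :=
      (PySem.Chars.find_ne_neg_one_iff s m).mpr (prefix_drop_infix hpre)
    have hle := he3 m hm hfind
    have hfnn : 0 ≤ PySem.Chars.find s m := by
      have := PySem.Chars.neg_one_le_find s m; omega
    obtain ⟨-, hspec⟩ := PySem.Chars.find_spec (s := s) (sub := m) hfnn
    exact hspec j (by omega) hpre
  have heYes : e < (n : Int) → ∃ m ∈ M, m <+: s.drop e.toNat := by
    intro hlt
    rcases he2 with h2 | ⟨m, hm, hfe, hne⟩
    · omega
    · have hfnn : 0 ≤ PySem.Chars.find s m := by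
        have := PySem.Chars.neg_one_le_find s m; omega
      obtain ⟨hpre, -⟩ := PySem.Chars.find_spec (s := s) (sub := m) hfnn
      exact ⟨m, hm, by rwa [hfe] at hpre⟩
  simp only [Nat.zero_add, Nat.sub_zero] at hr2 hr3 hr4
  rcases lt_trichotomy e.toNat r with hlt | heq | hgt
  · exact absurd (heYes (by omega)) (hr3 e.toNat hlt)
  · omega
  · exact absurd (hr4 (by omega)) (heNo r hgt)

-- ===== VERDICT (by name: the statement is the Claim_ definition above) =====
theorem find_framework_end_py_spec : Claim_equal_find_framework_end_py := by
  intro text start_pos end_markers _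
  exact pv_main_core start_pos
    (PySem.List.slice text.toList (some start_pos) (some (start_pos + 5000))) end_markers
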